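-- pv_equiv track=rewrite | github.com/underloki/Cyprium | kernel/crypto/text/vigenere.py | _process_autoclave
-- ===== SOURCE A (Python) =====
-- import string
--
-- WHITESMAP = set(string.punctuation + string.digits)
--
-- def _char_shift(c, k, negativ=False, base=ord('A'), modulo=26):
--     '''shift the char c, with the position in alphabet26 of char k,
--     negativ : shift in negativ side or not
--     base : base of char, 65==> upper, 97==>lower
--     modulo : the number of letters'''
--     if negativ:
--         return chr(((ord(c) - base * 2 - ord(k)) % modulo) + base)
--     else:
--         return chr(((ord(c) - base * 2 + ord(k)) % modulo) + base)
--
-- def _process_autoclave(text, key, decrypt=False):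
--     '''cypher or decypher text with key using the autoclave-cypher'''
--     index = 0
--     res = []
--     limit = len(key)
--     if decrypt:
--         nKey = list(key)
--         last = 0
--         for c in text:
--             if c in WHITESMAP:
--                 res.append(c)
--             else:
--                 if index >= limit:
--                     while res[last + index - limit] in WHITESMAP:
--                         last += 1
--                     nKey.append(res[last + index - limit])
--                 res.append(_char_shift(c, nKey[index], negativ=decrypt))
--                 index += 1
--     else:
--         if len(key) < len(text):
--             nKey = key + "".join(i for i in text if i not in WHITESMAP)
--         for c in text:
--             if c in WHITESMAP:
--                 res.append(c)
--             else:
--                 res.append(_char_shift(c, nKey[index]))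
--                 index += 1
--     return res
-- ===== SOURCE B (Python) =====
-- import string
--
-- WHITESMAP = set(string.punctuation + string.digits)
--
--
-- def _process_autoclave(text, key, decrypt=False):
--     '''cypher or decypher text with key using the autoclave-cypher'''
--     res = []
--     if decrypt:
--         limit = len(key)
--         recovered = []  # the decrypted non-"white" characters, in order
--         for c in text:
--             if c in WHITESMAP:
--                 res.append(c)
--             else:
--                 if len(recovered) < limit:
--                     k = key[len(recovered)]
--                 else:
--                     k = recovered[len(recovered) - limit]
--                 p = chr(((ord(c) - 130 - ord(k)) % 26) + 65)
--                 res.append(p)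
--                 recovered.append(p)
--     else:
--         stream = list(key) + [c for c in text if c not in WHITESMAP]
--         i = 0
--         for c in text:
--             if c in WHITESMAP:
--                 res.append(c)
--             else:
--                 res.append(chr(((ord(c) - 130 + ord(stream[i])) % 26) + 65))
--                 i += 1
--     return res
-- ===== Notes on version B (the rewrite author's own statement) =====
-- stated objective: simpler
-- what changed: The decrypt branch keeps a separate `recovered` list of decrypted non-white characters and reads the autoclave key char directly as recovered[index-limit], replacing A's persistent skip-pointer `last` and inner while-loop over `res`; the encrypt branch precomputes one key stream (key + non-white text) instead of the conditionally-bound nKey.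
import Mathlib
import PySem

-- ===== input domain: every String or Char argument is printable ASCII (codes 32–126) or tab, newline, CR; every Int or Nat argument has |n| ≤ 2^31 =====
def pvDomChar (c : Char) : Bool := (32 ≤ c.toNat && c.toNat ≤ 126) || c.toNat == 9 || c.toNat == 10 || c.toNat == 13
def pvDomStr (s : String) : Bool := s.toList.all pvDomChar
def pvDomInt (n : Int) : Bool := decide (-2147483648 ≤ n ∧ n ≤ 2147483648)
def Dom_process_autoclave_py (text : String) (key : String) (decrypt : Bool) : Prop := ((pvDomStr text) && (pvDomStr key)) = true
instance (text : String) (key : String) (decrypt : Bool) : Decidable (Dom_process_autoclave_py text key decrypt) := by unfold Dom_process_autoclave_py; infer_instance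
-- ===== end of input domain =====

-- B replaces A's decrypt-branch skip-pointer navigation of `res` by a separate `recovered`
-- list and A's encrypt-branch conditional key extension by a precomputed key stream (objective:
-- simpler). Equivalence of the RETURN value on Pre_ (exactly the inputs where A raises no
-- NameError/IndexError).

-- ===== PORT A =====
-- shared with port B, like Python's module-level WHITESMAP (punctuation + digits)
def pvWhite (c : Char) : Bool :=
  (33 ≤ c.toNat && c.toNat ≤ 64) || (91 ≤ c.toNat && c.toNat ≤ 96) ||
  (123 ≤ c.toNat && c.toNat ≤ 126)

-- _char_shift with the default base/modulo (the only way A calls it)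
def pvShift (c k : Char) (neg : Bool) : Char :=
  Char.ofNat (PySem.Int.mod ((c.toNat : Int) - 130 + (if neg then -(k.toNat : Int) else (k.toNat : Int))) 26 + 65).toNat

-- the inner `while res[last + index - limit] in WHITESMAP: last += 1`, returning the final
-- absolute position; if the scan runs off the end Python raises IndexError (excluded by Pre_)
def pvSkip (res : List Char) (pos : Nat) : Nat :=
  if h : pos < res.length then
    if pvWhite res[pos] then pvSkip res (pos + 1) else pos
  else pos
termination_by res.length - pos

-- the decrypt-branch for-loop; state: index, last, res, nKey
def pvLoopAdec (limit : Nat) : List Char → Nat → Nat → List Char → List Char → List Char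
  | [], _, _, res, _ => res
  | c :: cs, index, last, res, nKey =>
    if pvWhite c then pvLoopAdec limit cs index last (res ++ [c]) nKey
    else if limit ≤ index then
      let f := pvSkip res (last + (index - limit))
      let last' := f - (index - limit)
      let nKey' := nKey ++ [res.getD f ' ']   -- getD: out of range only where Python raises (outside Pre_)
      pvLoopAdec limit cs (index + 1) last' (res ++ [pvShift c (nKey'.getD index ' ') true]) nKey'
    else
      pvLoopAdec limit cs (index + 1) last (res ++ [pvShift c (nKey.getD index ' ') true]) nKey

-- the encrypt-branch for-loop; state: index, res
def pvLoopAenc (nKey : List Char) : List Char → Nat → List Char → List Char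
  | [], _, res => res
  | c :: cs, index, res =>
    if pvWhite c then pvLoopAenc nKey cs index (res ++ [c])
    else pvLoopAenc nKey cs (index + 1) (res ++ [pvShift c (nKey.getD index ' ') false])

def process_autoclave_py (text : String) (key : String) (decrypt : Bool) : List String :=
  (if decrypt then
    pvLoopAdec key.length text.toList 0 0 [] key.toList
  else
    -- when the guard is false Python leaves nKey unbound (NameError on first use; outside Pre_)
    let nKey := if key.length < text.length then
        key.toList ++ text.toList.filter (fun c => !pvWhite c) else []
    pvLoopAenc nKey text.toList 0 []).map (fun c => String.mk [c])

-- ===== PORT B =====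
-- decrypt loop of Source B; state: res, recovered
def pvLoopBdec (key : List Char) : List Char → List Char → List Char → List Char
  | [], res, _ => res
  | c :: cs, res, recovered =>
    if pvWhite c then pvLoopBdec key cs (res ++ [c]) recovered
    else
      let k := if recovered.length < key.length then key.getD recovered.length ' '
               else recovered.getD (recovered.length - key.length) ' '
      let p := pvShift c k true
      pvLoopBdec key cs (res ++ [p]) (recovered ++ [p])

-- encrypt loop of Source B; state: i, res
def pvLoopBenc (stream : List Char) : List Char → Nat → List Char → List Char
  | [], _, res => res
  | c :: cs, i, res =>
    if pvWhite c then pvLoopBenc stream cs i (res ++ [c])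
    else pvLoopBenc stream cs (i + 1) (res ++ [pvShift c (stream.getD i ' ') false])

def process_autoclave_py_alt (text : String) (key : String) (decrypt : Bool) : List String :=
  (if decrypt then
    pvLoopBdec key.toList text.toList [] []
  else
    pvLoopBenc (key.toList ++ text.toList.filter (fun c => !pvWhite c)) text.toList 0 []).map
    (fun c => String.mk [c])

-- ===== PRECONDITION & SPEC =====
-- Pre_ excludes exactly the inputs on which A raises: encrypting with len(key) >= len(text)
-- and some non-WHITESMAP char (nKey unbound -> NameError), and decrypting with an empty key
-- and some non-WHITESMAP char (the skip scan runs past res -> IndexError).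
def Pre_process_autoclave_py (text : String) (key : String) (decrypt : Bool) : Prop :=
  (if decrypt then key ≠ "" else key.length < text.length) ∨ text.toList.all pvWhite = true
instance (text : String) (key : String) (decrypt : Bool) : Decidable (Pre_process_autoclave_py text key decrypt) := by
  unfold Pre_process_autoclave_py; infer_instance

def pvWitness_process_autoclave_py : String × String × Bool := ("HI. U2", "KEY", true)

def Spec_process_autoclave_py (text : String) (key : String) (decrypt : Bool) (out : List String) : Prop := out = process_autoclave_py_alt text key decrypt
instance (text : String) (key : String) (decrypt : Bool) (out : List String) : Decidable (Spec_process_autoclave_py text key decrypt out) := by unfold Spec_process_autoclave_py; infer_instance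

-- ===== CLAIM (what is proved, stated in full; the proofs are below) =====
def Claim_equal_process_autoclave_py : Prop := ∀ (text : String) (key : String) (decrypt : Bool), Dom_process_autoclave_py text key decrypt → Pre_process_autoclave_py text key decrypt → Spec_process_autoclave_py text key decrypt (process_autoclave_py text key decrypt)

-- ===== LEMMAS AND PROOFS =====

theorem pv_enc_loops_eq (stream : List Char) (cs : List Char) (i : Nat) (res : List Char) :
    pvLoopAenc stream cs i res = pvLoopBenc stream cs i res := by
  induction cs generalizing i res with
  | nil => rfl
  | cons c cs ih => simp only [pvLoopAenc, pvLoopBenc]; split_ifs <;> apply ih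

theorem pv_enc_allwhite (stream : List Char) (cs : List Char) (i : Nat) (res : List Char)
    (h : cs.all pvWhite = true) : pvLoopBenc stream cs i res = res ++ cs := by
  induction cs generalizing i res with
  | nil => simp [pvLoopBenc]
  | cons c cs ih =>
    simp only [List.all_cons, Bool.and_eq_true] at h
    simp [pvLoopBenc, h.1, ih _ _ h.2]

theorem pv_dec_allwhite_A (limit : Nat) (cs : List Char) (i l : Nat) (res nKey : List Char)
    (h : cs.all pvWhite = true) : pvLoopAdec limit cs i l res nKey = res ++ cs := by
  induction cs generalizing i l res nKey with
  | nil => simp [pvLoopAdec]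
  | cons c cs ih =>
    simp only [List.all_cons, Bool.and_eq_true] at h
    simp [pvLoopAdec, h.1, ih _ _ _ _ h.2]

theorem pv_dec_allwhite_B (key : List Char) (cs : List Char) (res rec : List Char)
    (h : cs.all pvWhite = true) : pvLoopBdec key cs res rec = res ++ cs := by
  induction cs generalizing res rec with
  | nil => simp [pvLoopBdec]
  | cons c cs ih =>
    simp only [List.all_cons, Bool.and_eq_true] at h
    simp [pvLoopBdec, h.1, ih _ _ h.2]

theorem pvShift_not_white (c k : Char) (b : Bool) : pvWhite (pvShift c k b) = false := by
  unfold pvShift pvWhite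
  have h26 : (0:Int) < 26 := by norm_num
  have h1 := PySem.Int.mod_nonneg ((c.toNat : Int) - 130 + (if b then -(k.toNat : Int) else (k.toNat : Int))) h26
  have h2 := PySem.Int.mod_lt ((c.toNat : Int) - 130 + (if b then -(k.toNat : Int) else (k.toNat : Int))) h26
  set m := PySem.Int.mod ((c.toNat : Int) - 130 + (if b then -(k.toNat : Int) else (k.toNat : Int))) 26 with hm
  have hn : (m + 65).toNat = m.toNat + 65 := by omega
  have hb : m.toNat < 26 := by omega
  have hv : ((Char.ofNat (m + 65).toNat).toNat) = m.toNat + 65 := by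
    rw [hn, Char.toNat_ofNat, if_pos (Or.inl (by omega : m.toNat + 65 < 0xd800))]
  simp only [hv, Bool.or_eq_false_iff, Bool.and_eq_false_iff, decide_eq_false_iff_not, not_le]
  omega

theorem pv_length_countP (l : List Char) (p : Char → Bool) :
    l.length = l.countP p + l.countP (fun c => !p c) := by
  induction l with
  | nil => simp
  | cons a l ih => by_cases h : p a <;> simp [h, ih] <;> omega

-- the scan: if the suffix from p contains a non-white char, pvSkip finds the first one
theorem pvSkip_spec (res : List Char) (p : Nat)
    (h : (res.drop p).any (fun c => !pvWhite c) = true) :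
    p ≤ pvSkip res p ∧ pvSkip res p < res.length ∧
      pvWhite (res.getD (pvSkip res p) ' ') = false ∧
      ((res.take (pvSkip res p)).drop p).all pvWhite = true := by
  have key : ∀ n p, res.length - p ≤ n → (res.drop p).any (fun c => !pvWhite c) = true →
      p ≤ pvSkip res p ∧ pvSkip res p < res.length ∧
      pvWhite (res.getD (pvSkip res p) ' ') = false ∧
      ((res.take (pvSkip res p)).drop p).all pvWhite = true := by
    intro n
    induction n with
    | zero =>
      intro p hle hany
      rw [List.drop_eq_nil_of_le (by omega)] at hany
      simp at hany
    | succ n ih =>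
      intro p hle hany
      have hlt : p < res.length := by
        by_contra hge
        rw [List.drop_eq_nil_of_le (by omega)] at hany
        simp at hany
      rw [pvSkip, dif_pos hlt]
      by_cases hw : pvWhite res[p]
      · rw [if_pos hw]
        have hany' : (res.drop (p + 1)).any (fun c => !pvWhite c) = true := by
          rw [List.drop_eq_getElem_cons hlt, List.any_cons, hw] at hany
          simpa using hany
        obtain ⟨h1, h2, h3, h4⟩ := ih (p + 1) (by omega) hany'
        refine ⟨by omega, h2, h3, ?_⟩
        have hpf : p < (res.take (pvSkip res (p + 1))).length := by
          rw [List.length_take]; omega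
        rw [List.drop_eq_getElem_cons hpf, List.all_cons]
        have hgt : (res.take (pvSkip res (p + 1)))[p] = res[p] := by
          simp
        rw [hgt, hw, h4]
        rfl
      · rw [if_neg hw]
        refine ⟨le_rfl, hlt, ?_, ?_⟩
        · rw [List.getD_eq_getElem _ _ hlt]; simp [hw]
        · rw [List.drop_eq_nil_of_le (by rw [List.length_take]; omega)]
          simp
  exact key (res.length - p) p le_rfl h

-- invariant-carrying equivalence of the two decrypt loops:
-- `rec` is the list of already decrypted non-white chars (= B's `recovered`),
-- `idx` counts them, A's `nKey` is key ++ the first `idx - |key|` of them, and A's skip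
-- pointer `last` is the number of white chars in the first `last + (idx - |key|)` of `res`.
theorem pv_dec_loops_eq (key : List Char) (hk : key ≠ []) (cs : List Char) :
    ∀ (last : Nat) (res : List Char) (idx : Nat) (rec nKey : List Char),
      idx = res.countP (fun c => !pvWhite c) →
      rec = res.filter (fun c => !pvWhite c) →
      nKey = key ++ rec.take (idx - key.length) →
      last + (idx - key.length) ≤ res.length →
      (res.take (last + (idx - key.length))).countP pvWhite = last →
      pvLoopAdec key.length cs idx last res nKey = pvLoopBdec key cs res rec := by
  induction cs with
  | nil => intro last res idx rec nKey _ _ _ _ _; rfl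
  | cons c cs ih =>
    intro last res idx rec nKey hidx hrec hnk Hlen Hcnt
    have hkey : 1 ≤ key.length := by
      cases key with
      | nil => exact absurd rfl hk
      | cons a l => simp
    have lenrec : rec.length = idx := by
      rw [hrec, hidx, List.countP_eq_length_filter]
    by_cases hw : pvWhite c
    · -- white char: appended to res only, state otherwise unchanged
      simp only [pvLoopAdec, pvLoopBdec, hw, if_true]
      apply ih last (res ++ [c]) idx rec nKey
      · rw [hidx]; simp [hw]
      · rw [hrec]; simp [hw]
      · exact hnk
      · simp; omega
      · rw [List.take_append_of_le_length Hlen]; exact Hcnt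
    · by_cases hge : key.length ≤ idx
      · -- non-white char, autoclave zone: A scans res for the (idx-|key|)-th non-white char
        set j := idx - key.length with hj
        have hjlt : j < idx := by omega
        -- the take in the invariant has full length and exactly j non-white chars
        have htklen : (res.take (last + j)).length = last + j := by
          rw [List.length_take]; omega
        have hNWtake : (res.take (last + j)).countP (fun c => !pvWhite c) = j := by
          have := pv_length_countP (res.take (last + j)) pvWhite
          rw [htklen, Hcnt] at this; omega
        -- so the rest of res still holds a non-white char, and the scan succeeds
        have hsplit : res.countP (fun c => !pvWhite c)
            = (res.take (last + j)).countP (fun c => !pvWhite c)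
              + (res.drop (last + j)).countP (fun c => !pvWhite c) := by
          rw [← List.countP_append, List.take_append_drop]
        have hany : (res.drop (last + j)).any (fun c => !pvWhite c) = true := by
          rw [List.any_eq_true]
          exact List.countP_pos_iff.mp (by omega)
        obtain ⟨hf1, hf2, hf3, hf4⟩ := pvSkip_spec res (last + j) hany
        set f := pvSkip res (last + j) with hfdef
        -- counts in res.take f : the chars between last+j and f are all white
        have htf : res.take f = res.take (last + j) ++ (res.take f).drop (last + j) := by
          conv_lhs => rw [← List.take_append_drop (last + j) (res.take f)]
          rw [List.take_take, Nat.min_eq_left hf1]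
        have hseglen : ((res.take f).drop (last + j)).length = f - (last + j) := by
          rw [List.length_drop, List.length_take]; omega
        have hsegW : ((res.take f).drop (last + j)).countP pvWhite = f - (last + j) := by
          rw [← hseglen]
          exact List.countP_eq_length.mpr (List.all_eq_true.mp hf4)
        have hsegNW : ((res.take f).drop (last + j)).countP (fun c => !pvWhite c) = 0 := by
          have := pv_length_countP ((res.take f).drop (last + j)) pvWhite
          omega
        have htfW : (res.take f).countP pvWhite = f - j := by
          rw [htf, List.countP_append, Hcnt, hsegW]; omega
        have htfNW : (res.take f).countP (fun c => !pvWhite c) = j := by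
          rw [htf, List.countP_append, hNWtake, hsegNW]
          omega
        -- the char found at f is the j-th recovered char
        have hresfW : pvWhite res[f] = false := by
          rw [List.getD_eq_getElem _ ' ' hf2] at hf3; exact hf3
        have hfj : j ≤ f := by omega
        have hrecsplit : rec = (res.take f).filter (fun c => !pvWhite c)
            ++ res[f] :: (res.drop (f + 1)).filter (fun c => !pvWhite c) := by
          rw [hrec]
          conv_lhs => rw [← List.take_append_drop f res]
          rw [List.filter_append, List.drop_eq_getElem_cons hf2, List.filter_cons]
          simp [hresfW]
        have hlenfil : ((res.take f).filter (fun c => !pvWhite c)).length = j := by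
          rw [← List.countP_eq_length_filter, htfNW]
        have hresf : rec.getD j ' ' = res.getD f ' ' := by
          rw [List.getD_eq_getElem?_getD, hrecsplit,
            List.getElem?_append_right (le_of_eq hlenfil), hlenfil, Nat.sub_self,
            List.getElem?_cons_zero, List.getD_eq_getElem _ ' ' hf2]
          rfl
        -- unfold one step of each loop
        simp only [pvLoopAdec, pvLoopBdec, hw, if_false, if_pos hge, Bool.false_eq_true,
          if_neg (by simp : ¬False)]
        rw [← hfdef, ← hj]
        have hrectake : rec.take (j + 1) = rec.take j ++ [rec.getD j ' '] := by
          rw [List.getD_eq_getElem _ ' ' (by omega : j < rec.length)]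
          exact List.take_succ_eq_append_getElem (by omega)
        have hnk' : nKey ++ [res.getD f ' '] = key ++ rec.take (j + 1) := by
          rw [hnk, hrectake, ← hresf, List.append_assoc]
        have hnkchar : (nKey ++ [res.getD f ' ']).getD idx ' ' = rec.getD j ' ' := by
          rw [hnk', List.getD_eq_getElem?_getD,
            List.getElem?_append_right (by omega : key.length ≤ idx),
            (by omega : idx - key.length = j), List.getElem?_take_of_lt (by omega : j < j + 1),
            ← List.getD_eq_getElem?_getD]
        have hBbranch : ¬ rec.length < key.length := by omega
        rw [if_neg hBbranch, hnkchar, lenrec, ← hj]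
        set p := pvShift c (rec.getD j ' ') true with hp
        have hpNW : (fun c => !pvWhite c) p = true := by
          rw [hp]; simp [pvShift_not_white]
        -- recurse with the extended state
        apply ih (f - j) (res ++ [p]) (idx + 1) (rec ++ [p]) (nKey ++ [res.getD f ' '])
        · rw [List.countP_append, ← hidx]; simp [hpNW]
        · rw [List.filter_append, ← hrec]; simp [hpNW]
        · rw [hnk']
          have : idx + 1 - key.length = j + 1 := by omega
          rw [this, List.take_append_of_le_length (by omega : j + 1 ≤ rec.length)]
        · simp; omega
        · have harith : f - j + (idx + 1 - key.length) = f + 1 := by omega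
          rw [harith, List.take_append_of_le_length (by omega : f + 1 ≤ res.length),
            List.take_succ_eq_append_getElem hf2, List.countP_append, htfW]
          simp [hresfW]
      · -- non-white char, still inside the key: nKey is just key on both sides
        have hj0 : idx - key.length = 0 := by omega
        simp only [pvLoopAdec, pvLoopBdec, hw, Bool.false_eq_true, if_false, if_neg hge,
          if_neg (by simp : ¬False)]
        have hnkk : nKey = key := by rw [hnk, hj0]; simp
        have hBbranch : rec.length < key.length := by omega
        rw [if_pos hBbranch, lenrec, hnkk]
        set p := pvShift c (key.getD idx ' ') true with hp
        have hpNW : (fun c => !pvWhite c) p = true := by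
          rw [hp]; simp [pvShift_not_white]
        apply ih last (res ++ [p]) (idx + 1) (rec ++ [p]) key
        · rw [List.countP_append, ← hidx]; simp [hpNW]
        · rw [List.filter_append, ← hrec]; simp [hpNW]
        · have : idx + 1 - key.length = 0 := by omega
          rw [this]; simp
        · simp; omega
        · have : idx + 1 - key.length = 0 := by omega
          rw [this]
          rw [hj0] at Hlen Hcnt
          rw [List.take_append_of_le_length (by omega : last + 0 ≤ res.length)]
          exact Hcnt

-- ===== VERDICT (by name: the statement is the Claim_ definition above) =====
theorem process_autoclave_py_spec : Claim_equal_process_autoclave_py := by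
  intro text key decrypt _ hpre
  unfold Spec_process_autoclave_py process_autoclave_py process_autoclave_py_alt
  unfold Pre_process_autoclave_py at hpre
  cases decrypt with
  | false =>
    simp only [Bool.false_eq_true, if_false] at hpre ⊢
    rcases hpre with h | h
    · rw [if_pos h]
      exact congrArg _ (pv_enc_loops_eq _ _ _ _)
    · have hA : ∀ stream : List Char, pvLoopBenc stream text.toList 0 [] = text.toList := by
        intro stream
        rw [pv_enc_allwhite _ _ _ _ h]; rfl
      rw [pv_enc_loops_eq, hA, hA]
  | true =>
    simp only [if_true] at hpre ⊢
    rcases hpre with h | h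
    · have hkl : key.toList ≠ [] := by
        intro hl; exact h (String.toList_eq_nil_iff.mp hl)
      have hlen : key.length = key.toList.length := (String.length_toList (s := key)).symm
      rw [hlen]
      rw [pv_dec_loops_eq key.toList hkl text.toList 0 [] 0 [] key.toList
        (by simp) (by simp) (by simp) (by simp) (by simp)]
    · rw [pv_dec_allwhite_A _ _ _ _ _ _ h, pv_dec_allwhite_B _ _ _ _ h]
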